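-- pv_equiv track=rewrite | github.com/roypel/cs-projects | Python/Extended Introduction to CS/hw5.py | suffix_prefix_overlap_hash1
-- ===== SOURCE A (Python) =====
-- class Dict:
--     def __init__(self, m, hash_func=hash):
--         """ initial hash table, m empty entries """
--         self.table = [ [] for i in range(m)]
--         self.hash_mod = lambda x: hash_func(x) % m
--
--     def __repr__(self):
--         L = [self.table[i] for i in range(len(self.table))]
--         return "".join([str(i) + " " + str(L[i]) + "\n" for i in range(len(self.table))])
--
--     def insert(self, key, value):
--         """ insert key,value into table
--             Allow repetitions of keys """
--         i = self.hash_mod(key) #hash on key only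
--         item = [key, value]    #pack into one item
--         self.table[i].append(item)
--
--     def find(self, key):
--         """ returns ALL values of key as a list, empty list if none """
--         lst = []
--         key_hash = self.hash_mod(key)
--         [lst.append(item[1]) for item in self.table[key_hash]]
--         return lst
--
-- def suffix_prefix_overlap_hash1(lst, k):
--     d = Dict(len(lst))
--     ans = []
--     for i in range(len(lst)):
--         d.insert(lst[i][-k:], i)
--     for j in range(len(lst)):
--         pref = lst[j][:k]
--         search = d.find(pref)
--         for i in search:
--             if i != j:
--                 if lst[i][-k:] == pref:
--                     ans.append((i,j))
--     return ans
-- ===== SOURCE B (Python) =====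
-- def suffix_prefix_overlap_hash1(lst, k):
--     ans = []
--     for j in range(len(lst)):
--         pref = lst[j][:k]
--         for i in range(len(lst)):
--             if i != j and lst[i][-k:] == pref:
--                 ans.append((i, j))
--     return ans
-- ===== Notes on version B (the rewrite author's own statement) =====
-- stated objective: simpler
-- what changed: Replaces the hand-rolled chained hash table (build buckets, probe, rescan bucket) with a direct double loop over index pairs that tests the suffix/prefix equality in place, preserving A's j-outer, i-ascending output order.
import Mathlib
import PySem

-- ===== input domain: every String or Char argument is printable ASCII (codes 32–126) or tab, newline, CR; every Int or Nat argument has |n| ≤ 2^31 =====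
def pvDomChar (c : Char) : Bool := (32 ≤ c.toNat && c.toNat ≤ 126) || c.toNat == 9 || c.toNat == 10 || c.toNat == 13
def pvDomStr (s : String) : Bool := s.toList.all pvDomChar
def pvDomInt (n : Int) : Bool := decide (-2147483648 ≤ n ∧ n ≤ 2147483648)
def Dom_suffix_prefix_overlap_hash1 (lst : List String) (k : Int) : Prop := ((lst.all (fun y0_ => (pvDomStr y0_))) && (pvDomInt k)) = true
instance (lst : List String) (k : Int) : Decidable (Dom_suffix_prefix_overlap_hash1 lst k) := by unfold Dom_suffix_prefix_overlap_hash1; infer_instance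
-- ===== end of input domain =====

-- B replaces A's hand-rolled chained hash table (build buckets, probe, rescan the bucket)
-- with a plain double loop over index pairs in the same output order: simpler, same result.
-- (Python's `hash` is not portable; the port of A's Dict uses a concrete string hash —
-- the function's result is independent of the hash function, as the proof shows.)

-- ===== PORT A =====
-- concrete stand-in for Python's string `hash` (A's result does not depend on its choice)
def pvHash (s : String) : Nat := s.toList.foldl (fun a c => a + c.toNat) 0

-- Dict.insert: append [key, value] to bucket hash(key) % m
def pvInsertStep (n : Nat) (t : List (List (String × Int))) (key : String) (i : Int) :
    List (List (String × Int)) :=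
  t.modify (pvHash key % n) (fun b => b ++ [(key, i)])

def suffix_prefix_overlap_hash1 (lst : List String) (k : Int) : List (Int × Int) :=
  let n := lst.length
  -- d = Dict(len(lst)); for i in range(len(lst)): d.insert(lst[i][-k:], i)
  let table := (List.range n).foldl
    (fun t i => pvInsertStep n t (PySem.Str.slice (lst.getD i "") (some (-k)) none) (i : Int))
    (List.replicate n [])
  -- for j in range(len(lst)): pref = lst[j][:k]; search = d.find(pref); ...
  (List.range n).foldl (fun ans (j : Nat) =>
    let pref := PySem.Str.slice (lst.getD j "") none (some k)
    let search := (table.getD (pvHash pref % n) []).map (fun item => item.2)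
    search.foldl (fun ans i =>
      if i ≠ (j : Int) then
        if PySem.Str.slice (lst.getD i.toNat "") (some (-k)) none = pref then
          ans ++ [(i, (j : Int))]
        else ans
      else ans) ans) []

-- ===== PORT B =====
def suffix_prefix_overlap_hash1_alt (lst : List String) (k : Int) : List (Int × Int) :=
  (List.range lst.length).foldl (fun ans (j : Nat) =>
    let pref := PySem.Str.slice (lst.getD j "") none (some k)
    (List.range lst.length).foldl (fun ans (i : Nat) =>
      if (i : Int) ≠ (j : Int) ∧ PySem.Str.slice (lst.getD i "") (some (-k)) none = pref then
        ans ++ [((i : Int), (j : Int))]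
      else ans) ans) []

-- ===== PRECONDITION & SPEC =====
def Spec_suffix_prefix_overlap_hash1 (lst : List String) (k : Int) (out : List (Int × Int)) : Prop := out = suffix_prefix_overlap_hash1_alt lst k
instance (lst : List String) (k : Int) (out : List (Int × Int)) : Decidable (Spec_suffix_prefix_overlap_hash1 lst k out) := by unfold Spec_suffix_prefix_overlap_hash1; infer_instance

-- ===== CLAIM (what is proved, stated in full; the proofs are below) =====
def Claim_equal_suffix_prefix_overlap_hash1 : Prop := ∀ (lst : List String) (k : Int), Dom_suffix_prefix_overlap_hash1 lst k → Spec_suffix_prefix_overlap_hash1 lst k (suffix_prefix_overlap_hash1 lst k)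

-- ===== LEMMAS AND PROOFS =====

-- after inserting keys suf i for i ∈ idx, bucket b holds exactly the i with hash(suf i) % n = b,
-- in order, behind whatever was already there
theorem pv_build_getD (suf : Nat → String) (n : Nat) (idx : List Nat)
    (t : List (List (String × Int))) (ht : t.length = n) (b : Nat) (hb : b < n) :
    (idx.foldl (fun t i => pvInsertStep n t (suf i) (i : Int)) t).getD b []
      = t.getD b [] ++ (idx.filter (fun i => pvHash (suf i) % n = b)).map
          (fun i => (suf i, (i : Int))) := by
  induction idx generalizing t with
  | nil => simp
  | cons a as ih =>
    simp only [List.foldl_cons, List.filter_cons]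
    rw [ih _ (by simp [pvInsertStep, List.length_modify, ht])]
    have hbt : b < t.length := by omega
    obtain ⟨v, hv⟩ : ∃ v, t[b]? = some v := ⟨t[b], List.getElem?_eq_getElem hbt⟩
    have hveq : t.getD b [] = v := by simp [List.getD_eq_getElem?_getD, hv]
    have hget : (pvInsertStep n t (suf a) (a : Int)).getD b []
        = if pvHash (suf a) % n = b then t.getD b [] ++ [(suf a, (a : Int))]
          else t.getD b [] := by
      simp [pvInsertStep, List.getD_eq_getElem?_getD, List.getElem?_modify, hv]
    rw [hget]
    split
    · next h => simp [h, List.append_assoc]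
    · next h => simp [h]

-- the whole function, with the two slice computations abstracted into suf / preff:
-- probing bucket hash(preff j) % n and rescanning it equals scanning all indices
theorem pv_main (n : Nat) (suf preff : Nat → String) :
    (List.range n).foldl (fun ans (j : Nat) =>
      ((((List.range n).foldl (fun t i => pvInsertStep n t (suf i) (i : Int))
            (List.replicate n [])).getD (pvHash (preff j) % n) []).map
          (fun item => item.2)).foldl
        (fun ans i =>
          if i ≠ (j : Int) then
            if suf i.toNat = preff j then ans ++ [(i, (j : Int))] else ans
          else ans) ans) []
    = (List.range n).foldl (fun ans (j : Nat) =>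
        (List.range n).foldl (fun ans (i : Nat) =>
          if (i : Int) ≠ (j : Int) ∧ suf i = preff j then ans ++ [((i : Int), (j : Int))]
          else ans) ans) [] := by
  apply PySem.List.foldl_congr_mem
  intro ans j hj
  have hjn : j < n := List.mem_range.mp hj
  have hn : 0 < n := by omega
  have hb : pvHash (preff j) % n < n := Nat.mod_lt _ hn
  rw [pv_build_getD suf n (List.range n) (List.replicate n []) (by simp) _ hb]
  simp only [List.getD_eq_getElem?_getD, List.getElem?_replicate, if_pos hb,
    Option.getD_some, List.nil_append, List.map_map]
  have hA : ∀ (l : List Int) (acc : List (Int × Int)),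
      l.foldl (fun ans i =>
        if i ≠ (j : Int) then
          if suf i.toNat = preff j then ans ++ [(i, (j : Int))] else ans
        else ans) acc
      = acc ++ (l.filter (fun i => decide (i ≠ (j : Int) ∧ suf i.toNat = preff j))).map
          (fun i => (i, (j : Int))) := by
    intro l acc
    induction l generalizing acc with
    | nil => simp
    | cons x xs ih =>
      simp only [List.foldl_cons, List.filter_cons, ih]
      by_cases h1 : x = (j : Int)
      · simp [h1]
      · by_cases h2 : suf x.toNat = preff j
        · simp [h1, h2]
        · simp [h1, h2]
  have hB : ∀ (l : List Nat) (acc : List (Int × Int)),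
      l.foldl (fun ans (i : Nat) =>
        if (i : Int) ≠ (j : Int) ∧ suf i = preff j then ans ++ [((i : Int), (j : Int))]
        else ans) acc
      = acc ++ (l.filter (fun (i : Nat) => decide ((i : Int) ≠ (j : Int) ∧ suf i = preff j))).map
          (fun (i : Nat) => ((i : Int), (j : Int))) := by
    intro l acc
    induction l generalizing acc with
    | nil => simp
    | cons x xs ih =>
      simp only [List.foldl_cons, List.filter_cons, ih]
      by_cases h1 : x = j
      · simp [h1]
      · by_cases h2 : suf x = preff j
        · simp [h1, h2]
        · simp [h1, h2]
  rw [hA, hB]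
  congr 1
  -- push the filter through the map, merge the two filters, and drop the hash test
  -- (a matching suffix forces the matching hash)
  rw [List.filter_map, List.map_map, List.filter_filter]
  simp only [Function.comp_def, Int.toNat_natCast]
  have hfc : ∀ i ∈ List.range n,
      (decide ((i : Int) ≠ (j : Int) ∧ suf i = preff j) &&
        decide (pvHash (suf i) % n = pvHash (preff j) % n))
      = decide ((i : Int) ≠ (j : Int) ∧ suf i = preff j) := by
    intro i _
    by_cases h1 : i = j
    · simp [h1]
    · by_cases h2 : suf i = preff j
      · simp [h1, h2]
      · simp [h1, h2]
  exact congrArg (List.map fun x : Nat => ((x : Int), (j : Int))) (List.filter_congr hfc)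

theorem suffix_prefix_overlap_hash1_eq (lst : List String) (k : Int) :
    suffix_prefix_overlap_hash1 lst k = suffix_prefix_overlap_hash1_alt lst k :=
  pv_main lst.length
    (fun i => PySem.Str.slice (lst.getD i "") (some (-k)) none)
    (fun j => PySem.Str.slice (lst.getD j "") none (some k))

-- ===== VERDICT (by name: the statement is the Claim_ definition above) =====
theorem suffix_prefix_overlap_hash1_spec : Claim_equal_suffix_prefix_overlap_hash1 := by
  intro lst k _
  unfold Spec_suffix_prefix_overlap_hash1
  exact suffix_prefix_overlap_hash1_eq lst k
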